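-- pv_equiv track=rewrite | github.com/catseye/NaNoGenMo-Entries-2019 | Anne of Green Garbles/xform-fix-fullstops.py | reduce_fullstops
-- ===== SOURCE A (Python) =====
-- def is_abbreviation(word):
--     if word.isupper() and len(word) == 1:
--         return True
--     if word in ('Mrs', 'Mr', 'Dr', 'Ms'):
--         return True
--     return False
--
-- def reduce_fullstops(paragraph):
--     accum = []
--     for word in paragraph:
--         if word == '.' and accum and is_abbreviation(accum[-1]):
--             accum[-1] = accum[-1] + '.'
--         else:
--             accum.append(word)
--     return accum
-- ===== SOURCE B (Python) =====
-- def is_abbreviation(word):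
--     if word.isupper() and len(word) == 1:
--         return True
--     if word in ('Mrs', 'Mr', 'Dr', 'Ms'):
--         return True
--     return False
--
-- def reduce_fullstops(paragraph):
--     out = []
--     i = 0
--     n = len(paragraph)
--     while i < n:
--         w = paragraph[i]
--         if is_abbreviation(w) and i + 1 < n and paragraph[i + 1] == '.':
--             out.append(w + '.')
--             i += 2
--         else:
--             out.append(w)
--             i += 1
--     return out
-- ===== Notes on version B (the rewrite author's own statement) =====
-- stated objective: alternative
-- what changed: B scans with an explicit index and look-ahead, consuming an abbreviation and its following '.' as a pair, instead of A's reactive pass that mutates the last element of the accumulator when a '.' arrives.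
import Mathlib
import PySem

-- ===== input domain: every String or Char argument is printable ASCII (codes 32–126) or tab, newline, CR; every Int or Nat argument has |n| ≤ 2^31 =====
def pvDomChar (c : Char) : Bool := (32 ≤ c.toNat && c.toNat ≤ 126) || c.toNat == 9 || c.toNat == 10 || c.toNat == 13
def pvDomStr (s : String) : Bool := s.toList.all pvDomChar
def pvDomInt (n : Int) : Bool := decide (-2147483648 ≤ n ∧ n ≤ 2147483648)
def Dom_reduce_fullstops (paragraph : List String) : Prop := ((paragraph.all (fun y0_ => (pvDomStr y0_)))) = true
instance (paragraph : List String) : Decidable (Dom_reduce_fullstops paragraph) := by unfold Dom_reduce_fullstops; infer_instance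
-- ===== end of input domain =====

-- B replaces A's reactive accumulator pass (which mutates the last accumulated element when a '.'
-- arrives) by an index-with-look-ahead scan that consumes an abbreviation and its '.' as a pair;
-- objective: alternative decomposition, same O(n) cost.


-- ===== PORT A =====
-- word.isupper(): hand port (no PySem string-level isupper); exact on the ASCII domain,
-- where the cased characters are exactly the letters: some cased char and no lowercase one.
def py_isupper (s : String) : Bool :=
  s.toList.any (fun c => PySem.Chars.isalpha c) && s.toList.all (fun c => !PySem.Chars.islower c)

def is_abbreviation (word : String) : Bool :=
  if py_isupper word && (PySem.Str.len word == 1) then true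
  else if word == "Mrs" || word == "Mr" || word == "Dr" || word == "Ms" then true
  else false

-- the for-loop of A as structural recursion over the remaining words, same accumulator
def reduceA (accum : List String) : List String → List String
  | [] => accum
  | word :: rest =>
      if word == "." && !accum.isEmpty && is_abbreviation (accum.getLast?.getD "") then
        reduceA (accum.dropLast ++ [accum.getLast?.getD "" ++ "."]) rest
      else
        reduceA (accum ++ [word]) rest

def reduce_fullstops (paragraph : List String) : List String :=
  reduceA [] paragraph

-- ===== PORT B =====
-- B's while-loop over index i: inspect paragraph[i], look ahead at paragraph[i+1];
-- as recursion on the suffix starting at i.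
def reduceB : List String → List String
  | [] => []
  | [w] => [w]
  | w :: x :: rest =>
      if is_abbreviation w && x == "." then (w ++ ".") :: reduceB rest
      else w :: reduceB (x :: rest)

def reduce_fullstops_alt (paragraph : List String) : List String :=
  reduceB paragraph

-- ===== PRECONDITION & SPEC =====
def Spec_reduce_fullstops (paragraph : List String) (out : List String) : Prop := out = reduce_fullstops_alt paragraph
instance (paragraph : List String) (out : List String) : Decidable (Spec_reduce_fullstops paragraph out) := by unfold Spec_reduce_fullstops; infer_instance

-- ===== CLAIM (what is proved, stated in full; the proofs are below) =====
def Claim_equal_reduce_fullstops : Prop := ∀ (paragraph : List String), Dom_reduce_fullstops paragraph → Spec_reduce_fullstops paragraph (reduce_fullstops paragraph)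

-- ===== LEMMAS AND PROOFS =====

-- a word with '.' appended is never an abbreviation
theorem dot_ne (w s : String) (h : s.toList.getLast? ≠ some '.') : (w ++ "." == s) = false := by
  rw [beq_eq_false_iff_ne]
  intro he
  apply h
  rw [← he]
  have hlist : (w ++ ".").toList = w.toList ++ ['.'] := by simp
  rw [hlist, List.getLast?_concat]

theorem abbrev_append_dot (w : String) : is_abbreviation (w ++ ".") = false := by
  have h1 : (py_isupper (w ++ ".") && (PySem.Str.len (w ++ ".") == 1)) = false := by
    by_cases hw : w.toList = []
    · have hup : py_isupper (w ++ ".") = false := by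
        simp [py_isupper, hw, PySem.Chars.isalpha]
        decide
      simp [hup]
    · -- here w ≠ "", so len(w + '.') ≥ 2 and the first clause cannot fire
      simp
      intro _ hwe
      subst hwe
      simp at hw
  have h2 : (w ++ "." == "Mrs" || w ++ "." == "Mr" || w ++ "." == "Dr" || w ++ "." == "Ms") = false := by
    rw [dot_ne w "Mrs" (by decide), dot_ne w "Mr" (by decide), dot_ne w "Dr" (by decide),
      dot_ne w "Ms" (by decide)]
    rfl
  unfold is_abbreviation
  rw [h1, h2]
  rfl

-- A's loop never touches the frozen prefix of the accumulator
theorem reduceA_append (ws : List String) : ∀ (accum : List String) (w : String),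
    reduceA (accum ++ [w]) ws = accum ++ reduceA [w] ws := by
  induction ws with
  | nil => intro accum w; rfl
  | cons u rest ih =>
      intro accum w
      simp only [reduceA, List.getLast?_concat, Option.getD_some,
        List.dropLast_concat, List.isEmpty_cons]
      by_cases h : (u == "." && is_abbreviation w) = true
      · rw [if_pos, if_pos]
        · exact ih accum (w ++ ".")
        · simpa using h
        · simpa using h
      · rw [if_neg (by simpa using h), if_neg (by simpa using h)]
        show reduceA ((accum ++ [w]) ++ [u]) rest = accum ++ reduceA ([w] ++ [u]) rest
        rw [ih (accum ++ [w]) u, ih [w] u, List.append_assoc]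

-- A's loop from a singleton accumulator is B's look-ahead scan
theorem reduceA_eq_reduceB : ∀ (n : ℕ) (ws : List String), ws.length ≤ n →
    ∀ w, reduceA [w] ws = reduceB (w :: ws) := by
  intro n
  induction n with
  | zero =>
      intro ws hws w
      rw [List.length_eq_zero_iff.mp (Nat.le_zero.mp hws)]
      rfl
  | succ n ih =>
      intro ws hws w
      match ws with
      | [] => rfl
      | u :: rest =>
          by_cases hc : (u == "." && is_abbreviation w) = true
          · have hA : reduceA [w] (u :: rest) = reduceA [w ++ "."] rest := by
              simp only [reduceA]
              rw [if_pos (by simpa using hc)]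
              rfl
            have hB : reduceB (w :: u :: rest) = (w ++ ".") :: reduceB rest := by
              simp only [reduceB]
              rw [if_pos (by simpa [Bool.and_comm] using hc)]
            rw [hA, hB]
            match rest with
            | [] => rfl
            | v :: rest' =>
                have hstep : reduceA [w ++ "."] (v :: rest') = reduceA ([w ++ "."] ++ [v]) rest' := by
                  simp only [reduceA]
                  rw [if_neg (by simp [abbrev_append_dot])]
                rw [hstep, reduceA_append rest' [w ++ "."] v]
                have hlen : rest'.length ≤ n := by
                  simp only [List.length_cons] at hws
                  omega
                rw [ih rest' hlen v]
                rfl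
          · have hA : reduceA [w] (u :: rest) = reduceA ([w] ++ [u]) rest := by
              simp only [reduceA]
              rw [if_neg (by simpa using hc)]
            have hB : reduceB (w :: u :: rest) = w :: reduceB (u :: rest) := by
              simp only [reduceB]
              rw [if_neg (by simpa [Bool.and_comm] using hc)]
            have hlen : rest.length ≤ n := by
              simp only [List.length_cons] at hws
              omega
            rw [hA, reduceA_append rest [w] u, ih rest hlen u, hB]
            rfl

-- ===== VERDICT (by name: the statement is the Claim_ definition above) =====
theorem reduce_fullstops_spec : Claim_equal_reduce_fullstops := by
  intro p _
  unfold Spec_reduce_fullstops reduce_fullstops reduce_fullstops_alt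
  cases p with
  | nil => rfl
  | cons w ws =>
      show reduceA [] (w :: ws) = reduceB (w :: ws)
      simp only [reduceA, List.isEmpty_nil, Bool.not_true, Bool.and_false, Bool.false_and, List.nil_append]
      exact reduceA_eq_reduceB ws.length ws le_rfl w
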